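-- pv_equiv track=rewrite | github.com/cyuting940612/denoising-diffusion-pytorch | DataProcess_Transformer.py | split_and_fill
-- ===== SOURCE A (Python) =====
-- def split_and_fill(arr):
--     n = len(arr)
--     filled_arrays = []
--
--     for i in range(n):
--         filled_array = [1110] * n  # Create an array filled with 1111
--         for j in range(i + 1):
--             filled_array[j] = arr[j]  # Fill the first i+1 elements with the original values
--         filled_arrays.append(filled_array)
--
--     return filled_arrays
-- ===== SOURCE B (Python) =====
-- def split_and_fill(arr):
--     n = len(arr)
--     buffer = [1110] * n
--     filled_arrays = []
--     for i in range(n):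
--         buffer[i] = arr[i]
--         filled_arrays.append(buffer[:])
--     return filled_arrays
-- ===== Notes on version B (the rewrite author's own statement) =====
-- stated objective: faster
-- what changed: Replaces the nested re-initialize-and-refill loop (a fresh sentinel row rebuilt from scratch per index) with a single running buffer updated by one cell per step and copied into the result.
import Mathlib
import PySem

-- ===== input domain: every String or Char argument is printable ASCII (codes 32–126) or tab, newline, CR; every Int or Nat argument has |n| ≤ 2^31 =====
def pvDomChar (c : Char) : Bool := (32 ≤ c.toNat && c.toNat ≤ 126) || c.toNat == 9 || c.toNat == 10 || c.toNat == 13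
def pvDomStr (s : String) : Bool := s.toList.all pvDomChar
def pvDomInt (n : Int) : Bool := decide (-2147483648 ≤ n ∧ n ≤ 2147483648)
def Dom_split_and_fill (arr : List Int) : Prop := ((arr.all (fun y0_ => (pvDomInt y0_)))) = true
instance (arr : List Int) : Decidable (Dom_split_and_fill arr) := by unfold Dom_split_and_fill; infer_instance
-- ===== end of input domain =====

-- B replaces A's per-row re-initialize-and-refill inner loop with a single running
-- buffer updated one cell per step and copied into the result (objective: faster by a
-- constant factor; timing advisory).

-- ===== PORT A =====
def split_and_fill (arr : List Int) : List (List Int) :=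
  let n : Int := arr.length
  (PySem.List.pyRange 0 n 1).foldl
    (fun acc i =>
      acc ++ [(PySem.List.pyRange 0 (i + 1) 1).foldl
        (fun fa j => fa.set j.toNat (PySem.List.pyGetD arr j 0))
        (List.replicate n.toNat (1110 : Int))])
    []

-- ===== PORT B =====
def split_and_fill_alt (arr : List Int) : List (List Int) :=
  let n : Int := arr.length
  ((PySem.List.pyRange 0 n 1).foldl
    (fun (st : List Int × List (List Int)) i =>
      let buf := st.1.set i.toNat (PySem.List.pyGetD arr i 0)
      (buf, st.2 ++ [buf]))
    (List.replicate n.toNat (1110 : Int), [])).2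

-- ===== PRECONDITION & SPEC =====
def Spec_split_and_fill (arr : List Int) (out : List (List Int)) : Prop := out = split_and_fill_alt arr
instance (arr : List Int) (out : List (List Int)) : Decidable (Spec_split_and_fill arr out) := by unfold Spec_split_and_fill; infer_instance

-- ===== CLAIM (what is proved, stated in full; the proofs are below) =====
def Claim_equal_split_and_fill : Prop := ∀ (arr : List Int), Dom_split_and_fill arr → Spec_split_and_fill arr (split_and_fill arr)

-- ===== LEMMAS AND PROOFS =====

/-- The common row shape: first `k` entries of `arr`, padded with 1110. -/
def pvRow (arr : List Int) (k : Nat) : List Int :=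
  arr.take k ++ List.replicate (arr.length - k) (1110 : Int)

theorem pvRow_zero (arr : List Int) :
    pvRow arr 0 = List.replicate arr.length (1110 : Int) := by
  simp [pvRow]

theorem pvRow_set (arr : List Int) (k : Nat) (hk : k < arr.length) :
    (pvRow arr k).set k (arr.getD k 0) = pvRow arr (k + 1) := by
  have htk : (arr.take k).length = k := by
    simp [List.length_take]; omega
  have hrep : arr.length - k = (arr.length - (k + 1)) + 1 := by omega
  have htake : arr.take (k + 1) = arr.take k ++ [arr.getD k 0] := by
    rw [List.take_add_one]
    congr 1
    simp [List.getD_eq_getElem?_getD, List.getElem?_eq_getElem hk]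
  simp [pvRow, List.set_append, htk, hrep, List.replicate_succ, htake]

/-- A's inner fill loop, on the fresh sentinel row, produces `pvRow arr m`. -/
theorem pvInnerA (arr : List Int) (m : Nat) (hm : m ≤ arr.length) :
    (List.range m).foldl (fun fa j => fa.set j (arr.getD j 0)) (pvRow arr 0)
      = pvRow arr m := by
  induction m with
  | zero => simp
  | succ k ih =>
      rw [List.range_succ, List.foldl_append]
      rw [ih (by omega)]
      simp only [List.foldl_cons, List.foldl_nil]
      exact pvRow_set arr k (by omega)

/-- B's running state after `m` steps: the buffer is `pvRow arr m` and the
    output so far is the list of rows. -/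
theorem pvStateB (arr : List Int) (m : Nat) (hm : m ≤ arr.length) :
    (List.range m).foldl
      (fun (st : List Int × List (List Int)) k =>
        (st.1.set k (arr.getD k 0), st.2 ++ [st.1.set k (arr.getD k 0)]))
      (pvRow arr 0, [])
      = (pvRow arr m, (List.range m).map (fun i => pvRow arr (i + 1))) := by
  induction m with
  | zero => simp
  | succ k ih =>
      rw [List.range_succ, List.foldl_append]
      rw [ih (by omega)]
      simp only [List.foldl_cons, List.foldl_nil]
      rw [pvRow_set arr k (by omega)]
      simp [List.range_succ]

theorem pvA_eq (arr : List Int) :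
    split_and_fill arr = (List.range arr.length).map (fun i => pvRow arr (i + 1)) := by
  show (PySem.List.pyRange 0 ((arr.length : Nat) : Int)).foldl _ [] = _
  rw [PySem.List.pyRange_zero_natCast, List.foldl_map]
  rw [PySem.List.foldl_append_singleton_eq_map]
  apply List.map_congr_left
  intro i hi
  have hi' : i < arr.length := List.mem_range.mp hi
  have hcast : ((i : Int) + 1) = (((i + 1 : Nat)) : Int) := by push_cast; ring
  rw [hcast, PySem.List.pyRange_zero_natCast, List.foldl_map]
  have hfun : (fun (fa : List Int) (k : Nat) =>
      fa.set ((k : Int)).toNat (PySem.List.pyGetD arr (k : Int) 0))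
      = fun fa k => fa.set k (arr.getD k 0) := by
    funext fa k
    simp [PySem.List.pyGetD_natCast]
  rw [show List.replicate ((arr.length : Int)).toNat (1110 : Int)
      = pvRow arr 0 from by simp [pvRow_zero], hfun]
  exact pvInnerA arr (i + 1) (by omega)

theorem pvB_eq (arr : List Int) :
    split_and_fill_alt arr = (List.range arr.length).map (fun i => pvRow arr (i + 1)) := by
  show ((PySem.List.pyRange 0 ((arr.length : Nat) : Int)).foldl _ (List.replicate ((arr.length:Int)).toNat (1110:Int), [])).2 = _
  rw [PySem.List.pyRange_zero_natCast, List.foldl_map]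
  have hfun : (fun (st : List Int × List (List Int)) (k : Nat) =>
      let buf := st.1.set ((k : Int)).toNat (PySem.List.pyGetD arr (k : Int) 0)
      (buf, st.2 ++ [buf]))
      = fun (st : List Int × List (List Int)) k =>
        (st.1.set k (arr.getD k 0), st.2 ++ [st.1.set k (arr.getD k 0)]) := by
    funext st k
    simp [PySem.List.pyGetD_natCast]
  rw [hfun, show List.replicate ((arr.length : Int)).toNat (1110 : Int)
      = pvRow arr 0 from by simp [pvRow_zero]]
  rw [pvStateB arr arr.length le_rfl]

-- ===== VERDICT (by name: the statement is the Claim_ definition above) =====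
theorem split_and_fill_spec : Claim_equal_split_and_fill := by
  intro arr _
  unfold Spec_split_and_fill
  rw [pvA_eq, pvB_eq]
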